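-- pv_equiv track=rewrite | github.com/smohapatra1/scripting | python/practice/start_again/2024/04182024/maximizing_xor.py | maximizingOr
-- ===== SOURCE A (Python) =====
-- def maximizingOr(l, r):
--     m = 0
--     for i in range(l, r+1):
--         for j in range(i+1, r+1):
--             xor = i ^ j
--             if xor > m:
--                 m = xor
--     return m
-- ===== SOURCE B (Python) =====
-- def maximizingOr(l, r):
--     # Closed form: the max XOR over pairs in [l, r] is all-ones up to the
--     # highest bit at which the interval's endpoints can differ.
--     if l >= r:
--         return 0
--     if l >= 0 or r < 0:
--         return (1 << (l ^ r).bit_length()) - 1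
--     # l < 0 <= r: mixed-sign XORs are negative; best comes from one sign class.
--     best = 0
--     if r >= 1:
--         best = (1 << r.bit_length()) - 1
--     if l <= -2:
--         best = max(best, (1 << (-1 - l).bit_length()) - 1)
--     return best
-- ===== Notes on version B (the rewrite author's own statement) =====
-- stated objective: alternative
-- what changed: Replaced the double loop over all pairs with a closed form: the maximum pair-XOR is (1 << bit_length of the highest bit at which interval members can differ) - 1, split by the sign classes of the interval.
import Mathlib
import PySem

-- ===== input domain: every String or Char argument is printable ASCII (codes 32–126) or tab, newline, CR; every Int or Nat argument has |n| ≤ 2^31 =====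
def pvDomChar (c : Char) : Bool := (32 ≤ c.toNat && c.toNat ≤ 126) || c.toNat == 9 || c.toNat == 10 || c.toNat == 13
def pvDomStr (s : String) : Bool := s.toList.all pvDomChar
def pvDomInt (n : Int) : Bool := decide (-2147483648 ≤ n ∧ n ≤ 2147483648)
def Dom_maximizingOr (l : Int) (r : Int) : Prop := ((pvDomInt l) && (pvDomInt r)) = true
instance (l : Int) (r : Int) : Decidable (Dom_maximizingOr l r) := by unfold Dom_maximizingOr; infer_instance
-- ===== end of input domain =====

-- B replaces A's double loop over all pairs by a closed form built from bit_length.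

-- ===== PORT A =====
-- literal port of A's nested loops over range(l, r+1) and range(i+1, r+1)
def maximizingOr (l : Int) (r : Int) : Int :=
  (PySem.List.pyRange l (r + 1) 1).foldl (fun m i =>
    (PySem.List.pyRange (i + 1) (r + 1) 1).foldl (fun m j =>
      let x := PySem.Int.bxor i j
      if x > m then x else m) m) 0

-- ===== PORT B =====
-- literal port of Source B; Python's (1 << k) - 1 is written 2 ^ k - 1
def maximizingOr_alt (l : Int) (r : Int) : Int :=
  if l ≥ r then 0
  else if l ≥ 0 ∨ r < 0 then 2 ^ PySem.Int.bitLength (PySem.Int.bxor l r) - 1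
  else
    let best : Int := if r ≥ 1 then 2 ^ PySem.Int.bitLength r - 1 else 0
    let best := if l ≤ -2 then max best (2 ^ PySem.Int.bitLength (-1 - l) - 1) else best
    best

-- ===== PRECONDITION & SPEC =====
def Spec_maximizingOr (l : Int) (r : Int) (out : Int) : Prop := out = maximizingOr_alt l r
instance (l : Int) (r : Int) (out : Int) : Decidable (Spec_maximizingOr l r out) := by unfold Spec_maximizingOr; infer_instance

-- ===== CLAIM (what is proved, stated in full; the proofs are below) =====
def Claim_equal_maximizingOr : Prop := ∀ (l : Int) (r : Int), Dom_maximizingOr l r → Spec_maximizingOr l r (maximizingOr l r)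

-- ===== LEMMAS AND PROOFS =====

-- generic fold-max lemmas
theorem le_foldl_max (L : List Int) (a : Int) : a ≤ L.foldl max a := by
  induction L generalizing a with
  | nil => simp
  | cons x L ih => exact le_trans (le_max_left a x) (ih _)

theorem foldl_max_le_of_mem {x : Int} {L : List Int} (a : Int) (h : x ∈ L) :
    x ≤ L.foldl max a := by
  induction L generalizing a with
  | nil => cases h
  | cons y L ih =>
    rcases List.mem_cons.1 h with rfl | h
    · exact le_trans (le_max_right a x) (le_foldl_max _ _)
    · exact ih _ h

theorem foldl_max_eq_or_mem (L : List Int) (a : Int) :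
    L.foldl max a = a ∨ L.foldl max a ∈ L := by
  induction L generalizing a with
  | nil => left; rfl
  | cons y L ih =>
    rcases ih (max a y) with h | h
    · rcases le_total y a with hy | hy
      · left
        rw [List.foldl_cons, h, max_eq_left hy]
      · right
        rw [List.foldl_cons, h, max_eq_right hy]
        exact List.mem_cons_self
    · right; exact List.mem_cons_of_mem _ h

theorem foldl_foldl_flatMap (L : List Int) (f : Int → List Int) (a : Int) :
    L.foldl (fun m i => (f i).foldl max m) a = (L.flatMap f).foldl max a := by
  induction L generalizing a with
  | nil => rfl
  | cons x L ih => simp [List.foldl_append, ih]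

-- the list of pair-XORs A ranges over
def pairsXor (l r : Int) : List Int :=
  (PySem.List.pyRange l (r + 1) 1).flatMap (fun i =>
    (PySem.List.pyRange (i + 1) (r + 1) 1).map (fun j => PySem.Int.bxor i j))

theorem maximizingOr_eq_foldl (l r : Int) :
    maximizingOr l r = (pairsXor l r).foldl max 0 := by
  have hstep : ∀ i : Int,
      (fun (m j : Int) => if PySem.Int.bxor i j > m then PySem.Int.bxor i j else m)
        = fun (m j : Int) => max m (PySem.Int.bxor i j) := by
    intro i; funext m j
    by_cases h : PySem.Int.bxor i j > m
    · rw [if_pos h, max_eq_right (by omega)]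
    · rw [if_neg h, max_eq_left (by omega)]
  unfold maximizingOr pairsXor
  rw [← foldl_foldl_flatMap]
  simp only [List.foldl_map, hstep]

theorem mem_pairsXor {x l r : Int} :
    x ∈ pairsXor l r ↔ ∃ i j, l ≤ i ∧ i < j ∧ j ≤ r ∧ x = PySem.Int.bxor i j := by
  unfold pairsXor
  simp only [List.mem_flatMap, List.mem_map, PySem.List.mem_pyRange_one]
  constructor
  · rintro ⟨i, ⟨hi1, hi2⟩, j, ⟨hj1, hj2⟩, rfl⟩
    exact ⟨i, j, hi1, by omega, by omega, rfl⟩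
  · rintro ⟨i, j, h1, h2, h3, rfl⟩
    exact ⟨i, ⟨h1, by omega⟩, j, ⟨by omega, by omega⟩, rfl⟩

-- ===== core Nat bit lemmas =====

theorem div_pow_eq_of_between {l r x k : Nat} (hx1 : l ≤ x) (hx2 : x ≤ r)
    (h : l ^^^ r < 2 ^ k) : x / 2 ^ k = l / 2 ^ k := by
  have hlr : l / 2 ^ k = r / 2 ^ k := by
    have h0 : (l ^^^ r) >>> k = 0 := by
      rw [Nat.shiftRight_eq_div_pow]
      exact Nat.div_eq_of_lt h
    rw [Nat.shiftRight_xor_distrib] at h0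
    have := Nat.xor_eq_zero_iff.1 h0
    simpa [Nat.shiftRight_eq_div_pow] using this
  have h1 := Nat.div_le_div_right (c := 2 ^ k) hx1
  have h2 := Nat.div_le_div_right (c := 2 ^ k) hx2
  omega

theorem natUB {l r i j : Nat} (hli : l ≤ i) (hir : i ≤ r) (hlj : l ≤ j) (hjr : j ≤ r) :
    i ^^^ j < 2 ^ Nat.size (l ^^^ r) := by
  set k := Nat.size (l ^^^ r) with hk
  have hlt : l ^^^ r < 2 ^ k := Nat.lt_size_self _
  have hi := div_pow_eq_of_between hli hir hlt
  have hj := div_pow_eq_of_between hlj hjr hlt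
  have h0 : (i ^^^ j) / 2 ^ k = 0 := by
    have : (i ^^^ j) >>> k = 0 := by
      rw [Nat.shiftRight_xor_distrib, Nat.shiftRight_eq_div_pow, Nat.shiftRight_eq_div_pow,
        hi, hj]
      simp
    simpa [Nat.shiftRight_eq_div_pow] using this
  exact Nat.lt_of_div_eq_zero (Nat.two_pow_pos k) h0

theorem lt_half_of_testBit_false {x k : Nat} (hx : x < 2 ^ (k + 1))
    (hb : x.testBit k = false) : x < 2 ^ k := by
  rw [Nat.testBit_eq_decide_div_mod_eq] at hb
  have hd : x / 2 ^ k < 2 := by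
    rw [Nat.div_lt_iff_lt_mul (Nat.two_pow_pos _)]
    calc x < 2 ^ (k + 1) := hx
    _ = 2 * 2 ^ k := by ring
  have hne : x / 2 ^ k % 2 ≠ 1 := by
    intro hc
    rw [hc] at hb
    simp at hb
  have hz : x / 2 ^ k = 0 := by
    generalize hq : x / 2 ^ k = q at hd hne
    omega
  exact Nat.lt_of_div_eq_zero (Nat.two_pow_pos k) hz

theorem ge_half_of_testBit_true {x k : Nat} (hb : x.testBit k = true) : 2 ^ k ≤ x := by
  by_contra h
  rw [Nat.testBit_lt_two_pow (by omega)] at hb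
  cases hb

theorem xor_low {i j k : Nat} (h : i / 2 ^ k = j / 2 ^ k) :
    i ^^^ j = (i % 2 ^ k) ^^^ (j % 2 ^ k) := by
  apply Nat.eq_of_testBit_eq
  intro n
  rcases lt_or_ge n k with hn | hn
  · simp [Nat.testBit_xor, Nat.testBit_mod_two_pow, hn]
  · have hb : ∀ y : Nat, y.testBit n = (y / 2 ^ k).testBit (n - k) := by
      intro y
      rw [← Nat.shiftRight_eq_div_pow, Nat.testBit_shiftRight]
      congr 1
      omega
    simp [Nat.testBit_xor, Nat.testBit_mod_two_pow, Nat.not_lt.2 hn, hb i, hb j, h]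

theorem pow_sub_one_xor_pow (k : Nat) : (2 ^ k - 1) ^^^ 2 ^ k = 2 ^ (k + 1) - 1 := by
  apply Nat.eq_of_testBit_eq
  intro n
  rw [Nat.testBit_xor, Nat.testBit_two_pow_sub_one, Nat.testBit_two_pow,
    Nat.testBit_two_pow_sub_one]
  rcases lt_trichotomy n k with h | h | h
  · simp [h, Nat.ne_of_gt h, show n < k + 1 by omega]
  · simp [h, show k < k + 1 by omega]
  · simp [show ¬ (n < k) by omega, Nat.ne_of_lt h, show ¬ (n < k + 1) by omega]

theorem natEX {l r : Nat} (hlr : l < r) :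
    ∃ i j, l ≤ i ∧ i < j ∧ j ≤ r ∧ i ^^^ j = 2 ^ Nat.size (l ^^^ r) - 1 := by
  have hd0 : l ^^^ r ≠ 0 := fun h => absurd (Nat.xor_eq_zero_iff.1 h) (by omega)
  set d := l ^^^ r with hdd
  set k := Nat.size d with hk
  have hkpos : 0 < k := Nat.size_pos.2 (Nat.pos_of_ne_zero hd0)
  have hdlt : d < 2 ^ k := Nat.lt_size_self _
  have htop : d.testBit (k - 1) = true := by
    by_contra h
    have h' : d.testBit (k - 1) = false := by
      cases hb : d.testBit (k - 1) <;> simp_all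
    have hlt' : d < 2 ^ (k - 1) := by
      apply lt_half_of_testBit_false _ h'
      have he : k - 1 + 1 = k := by omega
      rw [he]; exact hdlt
    have := Nat.size_le.2 hlt'
    omega
  have hhigh : ∀ n, k - 1 < n → l.testBit n = r.testBit n := by
    intro n hn
    have hkn : k ≤ n := by omega
    have hbn : d.testBit n = false :=
      Nat.testBit_lt_two_pow (lt_of_lt_of_le hdlt (Nat.pow_le_pow_right (by norm_num) hkn))
    rw [hdd, Nat.testBit_xor] at hbn
    cases hbl : l.testBit n <;> cases hbr : r.testBit n <;> simp_all
  have hbit : l.testBit (k - 1) = false ∧ r.testBit (k - 1) = true := by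
    have hx : (l.testBit (k - 1) ^^ r.testBit (k - 1)) = true := by
      rw [← Nat.testBit_xor, ← hdd]; exact htop
    cases hbl : l.testBit (k - 1) <;> cases hbr : r.testBit (k - 1) <;>
      rw [hbl, hbr] at hx
    · exact absurd hx (by simp)
    · exact ⟨rfl, rfl⟩
    · exact absurd (Nat.lt_of_testBit (k - 1) hbr hbl fun n hn => (hhigh n hn).symm) (by omega)
    · exact absurd hx (by simp)
  have hp : r / 2 ^ k = l / 2 ^ k := div_pow_eq_of_between (le_of_lt hlr) le_rfl hdlt
  set K := 2 ^ k with hK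
  set H := 2 ^ (k - 1) with hH
  have hKH : K = 2 * H := by
    rw [hK, hH, ← Nat.pow_succ']
    congr 1
    omega
  have hHpos : 0 < H := Nat.two_pow_pos _
  have hlm : l % K < H := by
    apply lt_half_of_testBit_false (x := l % K) (k := k - 1)
    · have : l % K < K := Nat.mod_lt _ (by omega)
      omega
    · rw [hK, Nat.testBit_mod_two_pow]
      simp [hbit.1]
  have hrm : H ≤ r % K := by
    apply ge_half_of_testBit_true (x := r % K) (k := k - 1)
    rw [hK, Nat.testBit_mod_two_pow]
    simp [hbit.2, show k - 1 < k by omega]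
  set p := l / K with hpdef
  have hl_eq : p * K + l % K = l := by
    rw [hpdef, Nat.mul_comm]
    exact Nat.div_add_mod l K
  have hr_eq : p * K + r % K = r := by
    rw [← hp, Nat.mul_comm]
    exact Nat.div_add_mod r K
  refine ⟨p * K + (H - 1), p * K + H, ?_, by omega, ?_, ?_⟩
  · omega
  · omega
  · have hdiv : (p * K + (H - 1)) / 2 ^ k = (p * K + H) / 2 ^ k := by
      rw [← hK, Nat.mul_comm p K, Nat.mul_add_div (by omega), Nat.mul_add_div (by omega),
        Nat.div_eq_of_lt (by omega), Nat.div_eq_of_lt (by omega)]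
    rw [xor_low hdiv, ← hK, Nat.mul_comm p K, Nat.mul_add_mod, Nat.mul_add_mod,
      Nat.mod_eq_of_lt (by omega), Nat.mod_eq_of_lt (by omega)]
    have hpw := pow_sub_one_xor_pow (k - 1)
    rw [← hH] at hpw
    rw [hpw]
    congr 2
    omega

-- ===== bridging bitLength to Nat.size =====

theorem bitLength_natCast_eq_size (n : Nat) : PySem.Int.bitLength (n : Int) = Nat.size n := by
  apply le_antisymm
  · rcases Nat.eq_zero_or_pos n with rfl | hn
    · simp [PySem.Int.bitLength_zero]
    · have h2 : 2 ^ (PySem.Int.bitLength (n : Int) - 1) ≤ n := by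
        have := PySem.Int.two_pow_bitLength_le (n : Int)
          (by exact_mod_cast Nat.pos_iff_ne_zero.1 hn)
        simpa using this
      have hbl : 0 < PySem.Int.bitLength (n : Int) := by
        by_contra h
        have h0 : PySem.Int.bitLength (n : Int) = 0 := by omega
        have hlt2 := PySem.Int.lt_two_pow_bitLength (n : Int)
        rw [h0] at hlt2
        simp at hlt2
        omega
      have hlt : 2 ^ (PySem.Int.bitLength (n : Int) - 1) < 2 ^ Nat.size n :=
        lt_of_le_of_lt h2 (Nat.lt_size_self n)
      have := (Nat.pow_lt_pow_iff_right (by norm_num : 1 < 2)).1 hlt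
      omega
  · apply Nat.size_le.2
    have := PySem.Int.lt_two_pow_bitLength (n : Int)
    simpa using this

theorem bitLength_of_nonneg {n : Int} (h : 0 ≤ n) :
    PySem.Int.bitLength n = Nat.size n.toNat := by
  conv_lhs => rw [show n = ((n.toNat : Nat) : Int) by omega]
  exact bitLength_natCast_eq_size _

theorem pow_cast (k : Nat) : ((2 : Int) ^ k) = ((2 ^ k : Nat) : Int) := by push_cast; rfl

theorem bxor_nonneg_eq {a b : Int} (ha : 0 ≤ a) (hb : 0 ≤ b) :
    PySem.Int.bxor a b = ((a.toNat ^^^ b.toNat : Nat) : Int) := by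
  unfold PySem.Int.bxor
  rw [if_pos ha, if_pos hb]

theorem bxor_neg_eq {a b : Int} (ha : a < 0) (hb : b < 0) :
    PySem.Int.bxor a b = (((-a - 1).toNat ^^^ (-b - 1).toNat : Nat) : Int) := by
  unfold PySem.Int.bxor
  rw [if_neg (by omega), if_neg (by omega)]

theorem bxor_mixed_neg {a b : Int} (ha : a < 0) (hb : 0 ≤ b) :
    PySem.Int.bxor a b < 0 := by
  unfold PySem.Int.bxor
  rw [if_neg (by omega), if_pos hb]
  have : (0 : Int) ≤ (((-a - 1).toNat ^^^ b.toNat : Nat) : Int) := by positivity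
  omega

theorem two_pow_sub_one_nonneg (k : Nat) : (0 : Int) ≤ 2 ^ k - 1 := by
  have := pow_cast k
  have := Nat.two_pow_pos k
  omega

-- B is nonnegative
theorem alt_nonneg (l r : Int) : 0 ≤ maximizingOr_alt l r := by
  unfold maximizingOr_alt
  split_ifs with h1 h2 h3 h4
  · exact le_refl 0
  · exact two_pow_sub_one_nonneg _
  · exact le_trans (two_pow_sub_one_nonneg _) (le_max_of_le_right (le_refl _))
  · exact two_pow_sub_one_nonneg _
  · exact le_max_of_le_right (two_pow_sub_one_nonneg _)
  · exact le_refl 0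

-- every pair-XOR is bounded by B
theorem alt_ub {l r x : Int} (hx : x ∈ pairsXor l r) : x ≤ maximizingOr_alt l r := by
  obtain ⟨i, j, hli, hij, hjr, rfl⟩ := mem_pairsXor.1 hx
  have hlr : l < r := by omega
  unfold maximizingOr_alt
  rw [if_neg (by omega)]
  by_cases hl0 : (0 : Int) ≤ l
  · rw [if_pos (Or.inl hl0)]
    rw [bxor_nonneg_eq (by omega) (by omega), bxor_nonneg_eq hl0 (by omega),
      bitLength_natCast_eq_size]
    have hub := natUB (l := l.toNat) (r := r.toNat) (i := i.toNat) (j := j.toNat)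
      (by omega) (by omega) (by omega) (by omega)
    have := pow_cast (Nat.size (l.toNat ^^^ r.toNat))
    omega
  · by_cases hr0 : r < 0
    · rw [if_pos (Or.inr hr0)]
      rw [bxor_neg_eq (by omega) (by omega), bxor_neg_eq (by omega) hr0,
        bitLength_natCast_eq_size]
      have hub := natUB (l := (-r - 1).toNat) (r := (-l - 1).toNat)
        (i := (-i - 1).toNat) (j := (-j - 1).toNat) (by omega) (by omega) (by omega) (by omega)
      rw [Nat.xor_comm ((-r - 1).toNat)] at hub
      have := pow_cast (Nat.size ((-l - 1).toNat ^^^ (-r - 1).toNat))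
      omega
    · -- mixed interval: l < 0 ≤ r
      rw [if_neg (by omega)]
      have hbranch0 : (0 : Int) ≤
          (if l ≤ -2 then max (if r ≥ 1 then 2 ^ PySem.Int.bitLength r - 1 else 0)
              (2 ^ PySem.Int.bitLength (-1 - l) - 1)
            else (if r ≥ 1 then 2 ^ PySem.Int.bitLength r - 1 else 0)) := by
        split_ifs with h1 h2 h3
        · exact le_max_of_le_right (two_pow_sub_one_nonneg _)
        · exact le_max_of_le_right (two_pow_sub_one_nonneg _)
        · exact two_pow_sub_one_nonneg _
        · exact le_refl 0
      show PySem.Int.bxor i j ≤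
        (if l ≤ -2 then max (if r ≥ 1 then 2 ^ PySem.Int.bitLength r - 1 else 0)
            (2 ^ PySem.Int.bitLength (-1 - l) - 1)
          else (if r ≥ 1 then 2 ^ PySem.Int.bitLength r - 1 else 0))
      by_cases hi0 : (0 : Int) ≤ i
      · -- both in [0, r], so r ≥ 1
        have hr1 : (1 : Int) ≤ r := by omega
        rw [bxor_nonneg_eq hi0 (by omega)]
        have hub := natUB (l := 0) (r := r.toNat) (i := i.toNat) (j := j.toNat)
          (by omega) (by omega) (by omega) (by omega)
        rw [Nat.zero_xor] at hub
        have hle : ((i.toNat ^^^ j.toNat : Nat) : Int) ≤ 2 ^ PySem.Int.bitLength r - 1 := by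
          rw [bitLength_of_nonneg (by omega)]
          have := pow_cast (Nat.size r.toNat)
          omega
        refine le_trans hle ?_
        split_ifs <;>
          first
            | exact le_max_left _ _
            | exact le_refl _
      · by_cases hj0 : (0 : Int) ≤ j
        · -- mixed signs: XOR is negative
          exact le_trans (le_of_lt (bxor_mixed_neg (by omega) hj0)) hbranch0
        · -- both in [l, -1], so l ≤ -2
          have hl2 : l ≤ -2 := by omega
          rw [bxor_neg_eq (by omega) (by omega)]
          have hub := natUB (l := 0) (r := (-l - 1).toNat)
            (i := (-i - 1).toNat) (j := (-j - 1).toNat) (by omega) (by omega) (by omega) (by omega)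
          rw [Nat.zero_xor] at hub
          have hle : (((-i - 1).toNat ^^^ (-j - 1).toNat : Nat) : Int)
              ≤ 2 ^ PySem.Int.bitLength (-1 - l) - 1 := by
            rw [bitLength_of_nonneg (by omega), show (-1 - l).toNat = (-l - 1).toNat by omega]
            have := pow_cast (Nat.size ((-l - 1).toNat))
            omega
          refine le_trans hle ?_
          rw [if_pos hl2]
          exact le_max_right _ _

-- when B is nonzero it is itself one of the pair-XORs
theorem alt_ex {l r : Int} (h : maximizingOr_alt l r ≠ 0) :
    maximizingOr_alt l r ∈ pairsXor l r := by
  by_cases hlr : l ≥ r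
  · exfalso; apply h; unfold maximizingOr_alt; rw [if_pos hlr]
  · have hlr' : l < r := by omega
    by_cases hcase : l ≥ 0 ∨ r < 0
    · have hB : maximizingOr_alt l r = 2 ^ PySem.Int.bitLength (PySem.Int.bxor l r) - 1 := by
        unfold maximizingOr_alt; rw [if_neg hlr, if_pos hcase]
      rcases hcase with hl0 | hr0
      · obtain ⟨i', j', h1, h2, h3, hxor⟩ := natEX (l := l.toNat) (r := r.toNat) (by omega)
        refine mem_pairsXor.2 ⟨(i' : Int), (j' : Int), by omega, by omega, by omega, ?_⟩
        rw [hB, bxor_nonneg_eq (a := l) (b := r) hl0 (by omega),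
          bxor_nonneg_eq (a := (i' : Int)) (b := (j' : Int)) (by omega) (by omega),
          bitLength_natCast_eq_size]
        simp only [Int.toNat_natCast]
        rw [hxor]
        have := pow_cast (Nat.size (l.toNat ^^^ r.toNat))
        have := Nat.two_pow_pos (Nat.size (l.toNat ^^^ r.toNat))
        omega
      · obtain ⟨i', j', h1, h2, h3, hxor⟩ :=
          natEX (l := (-r - 1).toNat) (r := (-l - 1).toNat) (by omega)
        refine mem_pairsXor.2 ⟨-1 - (j' : Int), -1 - (i' : Int), by omega, by omega, by omega, ?_⟩
        rw [hB, bxor_neg_eq (a := l) (b := r) (by omega) hr0,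
          bxor_neg_eq (a := -1 - (j' : Int)) (b := -1 - (i' : Int)) (by omega) (by omega),
          bitLength_natCast_eq_size]
        rw [show (-(-1 - (j' : Int)) - 1).toNat = j' by omega,
          show (-(-1 - (i' : Int)) - 1).toNat = i' by omega]
        rw [Nat.xor_comm j' i', hxor, Nat.xor_comm ((-l - 1).toNat)]
        have := pow_cast (Nat.size ((-r - 1).toNat ^^^ (-l - 1).toNat))
        have := Nat.two_pow_pos (Nat.size ((-r - 1).toNat ^^^ (-l - 1).toNat))
        omega
    · -- mixed: l < 0 ≤ r
      have hl0 : l < 0 := by omega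
      have hr0 : (0 : Int) ≤ r := by omega
      have hB : maximizingOr_alt l r =
          (if l ≤ -2 then max (if r ≥ 1 then 2 ^ PySem.Int.bitLength r - 1 else 0)
              (2 ^ PySem.Int.bitLength (-1 - l) - 1)
            else (if r ≥ 1 then 2 ^ PySem.Int.bitLength r - 1 else 0)) := by
        unfold maximizingOr_alt; rw [if_neg hlr, if_neg hcase]
      -- the positive-side witness pair
      have hpos : (1 : Int) ≤ r →
          (2 ^ PySem.Int.bitLength r - 1) ∈ pairsXor l r := by
        intro hr1
        obtain ⟨i', j', h1, h2, h3, hxor⟩ := natEX (l := 0) (r := r.toNat) (by omega)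
        refine mem_pairsXor.2 ⟨(i' : Int), (j' : Int), by omega, by omega, by omega, ?_⟩
        rw [bxor_nonneg_eq (by omega) (by omega), bitLength_of_nonneg hr0]
        simp only [Int.toNat_natCast]
        rw [hxor, Nat.zero_xor]
        have := pow_cast (Nat.size r.toNat)
        have := Nat.two_pow_pos (Nat.size r.toNat)
        omega
      -- the negative-side witness pair
      have hneg : l ≤ -2 →
          (2 ^ PySem.Int.bitLength (-1 - l) - 1) ∈ pairsXor l r := by
        intro hl2
        obtain ⟨i', j', h1, h2, h3, hxor⟩ := natEX (l := 0) (r := (-l - 1).toNat) (by omega)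
        refine mem_pairsXor.2 ⟨-1 - (j' : Int), -1 - (i' : Int), by omega, by omega, by omega, ?_⟩
        rw [bxor_neg_eq (by omega) (by omega), bitLength_of_nonneg (by omega : (0:Int) ≤ -1 - l)]
        rw [show (-(-1 - (j' : Int)) - 1).toNat = j' by omega,
          show (-(-1 - (i' : Int)) - 1).toNat = i' by omega]
        rw [Nat.xor_comm j' i', hxor, Nat.zero_xor,
          show (-1 - l).toNat = (-l - 1).toNat by omega]
        have := pow_cast (Nat.size ((-l - 1).toNat))
        have := Nat.two_pow_pos (Nat.size ((-l - 1).toNat))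
        omega
      rw [hB] at h ⊢
      by_cases hl2 : l ≤ -2
      · rw [if_pos hl2] at h ⊢
        by_cases hr1 : r ≥ 1
        · rw [if_pos hr1] at h ⊢
          rcases max_choice ((2 : Int) ^ PySem.Int.bitLength r - 1)
            ((2 : Int) ^ PySem.Int.bitLength (-1 - l) - 1) with hm | hm
          · rw [hm]; exact hpos hr1
          · rw [hm]; exact hneg hl2
        · rw [if_neg hr1] at h ⊢
          rw [max_eq_right (two_pow_sub_one_nonneg _)] at h ⊢
          exact hneg hl2
      · rw [if_neg hl2] at h ⊢
        by_cases hr1 : r ≥ 1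
        · rw [if_pos hr1] at h ⊢
          exact hpos hr1
        · rw [if_neg hr1] at h
          exact absurd rfl h

theorem maximizingOr_eq (l r : Int) : maximizingOr l r = maximizingOr_alt l r := by
  rw [maximizingOr_eq_foldl]
  apply le_antisymm
  · rcases foldl_max_eq_or_mem (pairsXor l r) 0 with h | h
    · rw [h]; exact alt_nonneg l r
    · exact alt_ub h
  · by_cases hB : maximizingOr_alt l r = 0
    · rw [hB]; exact le_foldl_max _ _
    · exact foldl_max_le_of_mem _ (alt_ex hB)

-- ===== VERDICT (by name: the statement is the Claim_ definition above) =====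
theorem maximizingOr_spec : Claim_equal_maximizingOr := by
  intro l r _
  unfold Spec_maximizingOr
  exact maximizingOr_eq l r
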